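-- pv_equiv track=rewrite | github.com/jacobbelding/BioSensor-Architect | src/biosensor_architect/tools/paper_ingest.py | deduplicate_parts
-- ===== SOURCE A (Python) =====
-- def deduplicate_parts(new_parts: list[dict], existing_parts: list[dict]) -> list[dict]:
--     """Filter out parts that already exist in the catalog.
--
--     Matches on id or name (case-insensitive).
--     """
--     existing_ids = {p.get("id", "").lower() for p in existing_parts}
--     existing_names = {p.get("name", "").lower() for p in existing_parts}
--
--     unique = []
--     for part in new_parts:
--         pid = part.get("id", "").lower()
--         pname = part.get("name", "").lower()
--         if pid not in existing_ids and pname not in existing_names: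
--             unique.append(part)
--
--     return unique
-- ===== SOURCE B (Python) =====
-- def deduplicate_parts(new_parts: list[dict], existing_parts: list[dict]) -> list[dict]:
--     """Filter out parts that already exist in the catalog (match on id or name, case-insensitive).
--
--     Strategy: start from all new parts (with their lowered keys precomputed) and let each
--     existing part successively strike out the new parts it collides with.
--     """
--     remaining = [(p.get("id", "").lower(), p.get("name", "").lower(), p) for p in new_parts]
--     for ep in existing_parts:
--         eid = ep.get("id", "").lower()
--         ename = ep.get("name", "").lower()
--         remaining = [t for t in remaining if t[0] != eid and t[1] != ename]
--     return [t[2] for t in remaining]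
-- ===== Notes on version B (the rewrite author's own statement) =====
-- stated objective: alternative
-- what changed: Inverts the traversal: instead of indexing existing parts into id/name sets and filtering new_parts once, B starts from all new parts (with lowered keys precomputed) and loops over existing_parts, each existing part successively striking out the new parts whose id or name collides with it.
import Mathlib
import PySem

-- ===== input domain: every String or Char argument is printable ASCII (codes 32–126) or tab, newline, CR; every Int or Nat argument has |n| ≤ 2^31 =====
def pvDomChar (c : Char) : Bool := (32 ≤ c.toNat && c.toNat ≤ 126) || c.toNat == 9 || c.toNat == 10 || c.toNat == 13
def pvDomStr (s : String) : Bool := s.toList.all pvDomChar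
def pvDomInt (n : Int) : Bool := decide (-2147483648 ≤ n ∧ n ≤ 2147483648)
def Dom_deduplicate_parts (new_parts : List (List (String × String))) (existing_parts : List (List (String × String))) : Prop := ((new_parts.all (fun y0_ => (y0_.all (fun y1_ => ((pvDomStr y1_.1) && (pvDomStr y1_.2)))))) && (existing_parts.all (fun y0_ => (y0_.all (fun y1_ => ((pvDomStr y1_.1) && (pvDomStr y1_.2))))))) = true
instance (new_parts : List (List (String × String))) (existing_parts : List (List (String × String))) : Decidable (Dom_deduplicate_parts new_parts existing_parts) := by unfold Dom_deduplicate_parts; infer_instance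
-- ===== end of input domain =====

-- B inverts the traversal: no id/name sets; it loops over existing_parts, each existing part striking out the colliding new parts (alternative decomposition, not faster).

-- ===== PORT A =====
-- part.get(k, "").lower() on an assoc-list dict (lookup = first match)
def pvGetLower (p : List (String × String)) (k : String) : String :=
  PySem.Str.lower ((PySem.Dict.mk p).getD k "")

def deduplicate_parts (new_parts : List (List (String × String))) (existing_parts : List (List (String × String))) : List (List (String × String)) :=
  let existing_ids := PySem.Set.ofList (existing_parts.map (fun p => pvGetLower p "id"))
  let existing_names := PySem.Set.ofList (existing_parts.map (fun p => pvGetLower p "name"))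
  new_parts.foldl (fun unique part =>
    let pid := pvGetLower part "id"
    let pname := pvGetLower part "name"
    if !(existing_ids.contains pid) && !(existing_names.contains pname) then unique ++ [part] else unique) []

-- ===== PORT B =====
def deduplicate_parts_alt (new_parts : List (List (String × String))) (existing_parts : List (List (String × String))) : List (List (String × String)) :=
  let remaining0 := new_parts.map (fun p => (pvGetLower p "id", pvGetLower p "name", p))
  let remaining := existing_parts.foldl (fun rem ep =>
    let eid := pvGetLower ep "id"
    let ename := pvGetLower ep "name"
    rem.filter (fun t => t.1 != eid && t.2.1 != ename)) remaining0
  remaining.map (fun t => t.2.2)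

-- ===== PRECONDITION & SPEC =====
def Spec_deduplicate_parts (new_parts : List (List (String × String))) (existing_parts : List (List (String × String))) (out : List (List (String × String))) : Prop := out = deduplicate_parts_alt new_parts existing_parts
instance (new_parts : List (List (String × String))) (existing_parts : List (List (String × String))) (out : List (List (String × String))) : Decidable (Spec_deduplicate_parts new_parts existing_parts out) := by unfold Spec_deduplicate_parts; infer_instance

-- ===== CLAIM (what is proved, stated in full; the proofs are below) =====
def Claim_equal_deduplicate_parts : Prop := ∀ (new_parts : List (List (String × String))) (existing_parts : List (List (String × String))), Dom_deduplicate_parts new_parts existing_parts → Spec_deduplicate_parts new_parts existing_parts (deduplicate_parts new_parts existing_parts)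

-- ===== LEMMAS AND PROOFS =====
-- membership in the deduplicated set of lowered keys = a direct any-scan of existing_parts
theorem contains_ofList_map_eq_any (l : List (List (String × String))) (k x : String) :
    (PySem.Set.ofList (l.map (fun p => pvGetLower p k))).contains x
      = l.any (fun ep => pvGetLower ep k == x) := by
  rw [Bool.eq_iff_iff]
  rw [show ((PySem.Set.ofList (l.map (fun p => pvGetLower p k))).contains x = true) ↔
        x ∈ PySem.Set.ofList (l.map (fun p => pvGetLower p k)) from List.contains_iff_mem,
      List.any_eq_true]
  simp only [PySem.Set.mem_ofList, List.mem_map, beq_iff_eq]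

-- successive filtering by each element of l = one filter by the conjunction over l
theorem foldl_filter_eq_filter_all {α β : Type} (l : List β) (q : β → α → Bool) (init : List α) :
    l.foldl (fun rem e => rem.filter (q e)) init = init.filter (fun t => l.all (fun e => q e t)) := by
  induction l generalizing init with
  | nil => simp
  | cons e rest ih =>
    simp only [List.foldl_cons, ih, List.filter_filter, List.all_cons]
    exact List.filter_congr (fun t _ => by cases q e t <;> simp

)

-- !any over two scans = one all-scan of the conjoined negations
theorem not_any_and_not_any {α : Type} (l : List α) (f g : α → Bool) :
    (!(l.any f) && !(l.any g)) = l.all (fun x => !f x && !g x) := by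
  induction l with
  | nil => rfl
  | cons a rest ih =>
    simp only [List.any_cons, List.all_cons, Bool.not_or, ← ih]
    cases f a <;> cases g a <;> cases rest.any f <;> cases rest.any g <;> rfl

-- A's kept-test (no lowered key in either set) = B's kept-test (every existing part misses both keys)
theorem keep_pred_eq (ex : List (List (String × String))) (pid pname : String) :
    (!(PySem.Set.ofList (ex.map (fun p => pvGetLower p "id"))).contains pid
      && !(PySem.Set.ofList (ex.map (fun p => pvGetLower p "name"))).contains pname)
    = ex.all (fun ep => pid != pvGetLower ep "id" && pname != pvGetLower ep "name") := by
  rw [contains_ofList_map_eq_any, contains_ofList_map_eq_any, not_any_and_not_any]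
  congr 1
  funext ep
  have h1 : (pid != pvGetLower ep "id") = !(pvGetLower ep "id" == pid) := by
    simp [bne, eq_comm]
  have h2 : (pname != pvGetLower ep "name") = !(pvGetLower ep "name" == pname) := by
    simp [bne, eq_comm]
  rw [h1, h2]

-- ===== VERDICT (by name: the statement is the Claim_ definition above) =====
theorem deduplicate_parts_spec : Claim_equal_deduplicate_parts := by
  intro new_parts existing_parts _
  unfold Spec_deduplicate_parts deduplicate_parts deduplicate_parts_alt
  simp only [PySem.List.foldl_append_if_eq_filter, foldl_filter_eq_filter_all, List.filter_map,
    List.map_map, Function.comp_def, keep_pred_eq, List.nil_append, List.map_id']
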